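-- pv_equiv track=rewrite | github.com/nitin22032002/leetcode_question | Prefix Suffix String - GFG/prefix-suffix-string.py | prefixSuffixString
-- ===== SOURCE A (Python) =====
-- def prefixSuffixString(s1, s2) -> int:
--     obj1=Trie()
--     obj2=Trie()
--     for item in s1:
--         obj1.insert(item)
--         obj2.insert(item[::-1])
--     ans=0
--     for item in s2:
--         if(obj1.find(item) or obj2.find(item[::-1])):
--             ans+=1
--     return ans
--
-- class Trie:
--     def __init__(self):
--         self.child={}
--     def insert(self,word):
--         d=self.child
--         for item in word:
--             if(item not in d):
--                 d[item]={}
--             d=d[item]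
--     def find(self,word):
--         d=self.child
--         for item in word:
--             if(item not in d):
--                 return False
--             d=d[item]
--         return True
-- ===== SOURCE B (Python) =====
-- def prefixSuffixString(s1, s2) -> int:
--     ans = 0
--     for w in s2:
--         if w == "" or any(x.startswith(w) for x in s1) or any(x.endswith(w) for x in s1):
--             ans += 1
--     return ans
-- ===== Notes on version B (the rewrite author's own statement) =====
-- stated objective: simpler
-- what changed: Drops both hand-built character tries; one pass over s2 checks each word directly with any(x.startswith(w)) / any(x.endswith(w)) over s1, keeping the empty word counted unconditionally.
import Mathlib
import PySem

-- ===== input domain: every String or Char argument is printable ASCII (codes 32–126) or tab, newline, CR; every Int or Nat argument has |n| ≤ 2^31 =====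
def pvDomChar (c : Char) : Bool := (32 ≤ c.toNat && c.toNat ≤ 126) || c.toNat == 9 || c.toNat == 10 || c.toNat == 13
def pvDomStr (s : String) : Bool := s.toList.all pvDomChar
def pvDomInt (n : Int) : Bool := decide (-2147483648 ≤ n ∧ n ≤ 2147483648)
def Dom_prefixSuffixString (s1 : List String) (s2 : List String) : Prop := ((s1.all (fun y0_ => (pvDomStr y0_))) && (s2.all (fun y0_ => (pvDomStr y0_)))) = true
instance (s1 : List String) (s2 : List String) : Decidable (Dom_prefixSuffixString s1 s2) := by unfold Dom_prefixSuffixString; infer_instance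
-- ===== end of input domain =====

-- B replaces A's two hand-built tries by a direct startswith/endswith scan of s1 per s2 word (simpler; same result).

-- ===== PORT A =====
-- A's nested dict-of-dicts trie is encoded as the set of its node paths (a node is the
-- list of chars on the path from the root): 'item in d' at the node reached by path p is
-- exactly 'p ++ [item] ∈ S'. Dict insertion/orders never affect A's result, so this is exact.
def trieInsertGo (S : PySem.Set (List Char)) (p : List Char) : List Char → PySem.Set (List Char)
  | [] => S
  | c :: rest => trieInsertGo (PySem.Set.add S (p ++ [c])) (p ++ [c]) rest  -- if item not in d: d[item]={}; d=d[item]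

def trieFindGo (S : PySem.Set (List Char)) (p : List Char) : List Char → Bool
  | [] => true
  | c :: rest => if (p ++ [c]) ∈ S then trieFindGo S (p ++ [c]) rest else false

def prefixSuffixString (s1 : List String) (s2 : List String) : Int :=
  -- one loop over s1 inserting item into obj1 and item[::-1] into obj2
  let objs := s1.foldl (fun (o : PySem.Set (List Char) × PySem.Set (List Char)) item =>
      (trieInsertGo o.1 [] item.toList, trieInsertGo o.2 [] item.toList.reverse))
    (PySem.Set.empty, PySem.Set.empty)
  s2.foldl (fun ans item =>
      if trieFindGo objs.1 [] item.toList || trieFindGo objs.2 [] item.toList.reverse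
      then ans + 1 else ans) 0

-- ===== PORT B =====
def prefixSuffixString_alt (s1 : List String) (s2 : List String) : Int :=
  s2.foldl (fun ans w =>
      if (w == "") || s1.any (fun x => PySem.Str.startswith x w) || s1.any (fun x => PySem.Str.endswith x w)
      then ans + 1 else ans) 0

-- ===== PRECONDITION & SPEC =====
def Spec_prefixSuffixString (s1 : List String) (s2 : List String) (out : Int) : Prop := out = prefixSuffixString_alt s1 s2
instance (s1 : List String) (s2 : List String) (out : Int) : Decidable (Spec_prefixSuffixString s1 s2 out) := by unfold Spec_prefixSuffixString; infer_instance

-- ===== CLAIM (what is proved, stated in full; the proofs are below) =====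
def Claim_equal_prefixSuffixString : Prop := ∀ (s1 : List String) (s2 : List String), Dom_prefixSuffixString s1 s2 → Spec_prefixSuffixString s1 s2 (prefixSuffixString s1 s2)

-- ===== LEMMAS AND PROOFS =====

theorem mem_trieInsertGo (w : List Char) : ∀ (S : PySem.Set (List Char)) (p q : List Char),
    q ∈ trieInsertGo S p w ↔ q ∈ S ∨ ∃ pre, pre ≠ [] ∧ pre <+: w ∧ q = p ++ pre := by
  induction w with
  | nil => intro S p q; simp [trieInsertGo]
  | cons c rest ih =>
    intro S p q
    rw [trieInsertGo, ih]
    constructor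
    · rintro (h | ⟨pre, hne, hpre, rfl⟩)
      · rw [PySem.Set.mem_add] at h
        rcases h with h | rfl
        · exact Or.inl h
        · exact Or.inr ⟨[c], by simp, ⟨rest, rfl⟩, rfl⟩
      · exact Or.inr ⟨c :: pre, by simp, List.cons_prefix_cons.mpr ⟨rfl, hpre⟩, by simp⟩
    · rintro (h | ⟨pre, hne, hpre, rfl⟩)
      · exact Or.inl (by rw [PySem.Set.mem_add]; exact Or.inl h)
      · match pre, hne with
        | c' :: pre', _ =>
          obtain ⟨rfl, hp'⟩ := List.cons_prefix_cons.mp hpre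
          by_cases hp0 : pre' = []
          · subst hp0
            exact Or.inl (by rw [PySem.Set.mem_add]; exact Or.inr rfl)
          · exact Or.inr ⟨pre', hp0, hp', by simp⟩

theorem trieFindGo_iff (w : List Char) : ∀ (S : PySem.Set (List Char)) (p : List Char),
    trieFindGo S p w = true ↔ ∀ pre, pre ≠ [] → pre <+: w → (p ++ pre) ∈ S := by
  induction w with
  | nil =>
    intro S p
    simp only [trieFindGo, true_iff]
    intro pre hne hpre
    exact absurd (List.prefix_nil.mp hpre) hne
  | cons c rest ih =>
    intro S p
    rw [trieFindGo]
    split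
    · rename_i hmem
      rw [ih]
      constructor
      · intro h pre hne hpre
        match pre, hne with
        | c' :: pre', _ =>
          obtain ⟨rfl, hp'⟩ := List.cons_prefix_cons.mp hpre
          by_cases hp0 : pre' = []
          · subst hp0; exact hmem
          · simp only [List.append_assoc] at h ⊢; exact h pre' hp0 hp'
      · intro h pre hne hpre
        simpa using h (c :: pre) (by simp) (List.cons_prefix_cons.mpr ⟨rfl, hpre⟩)
    · rename_i hmem
      simp only [Bool.false_eq_true, false_iff]
      intro h
      exact hmem (h [c] (by simp) ⟨rest, rfl⟩)

-- membership in the trie built by folding insertions of (f x) for x ∈ ws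
theorem mem_buildTrie (f : String → List Char) (ws : List String) :
    ∀ (S0 : PySem.Set (List Char)) (q : List Char),
    q ∈ ws.foldl (fun S x => trieInsertGo S [] (f x)) S0 ↔
      q ∈ S0 ∨ ∃ x ∈ ws, q ≠ [] ∧ q <+: f x := by
  induction ws with
  | nil => intro S0 q; simp
  | cons y ys ih =>
    intro S0 q
    rw [List.foldl_cons, ih]
    rw [mem_trieInsertGo]
    constructor
    · rintro ((h | ⟨pre, hne, hpre, rfl⟩) | ⟨x, hx, hq, hqp⟩)
      · exact Or.inl h
      · exact Or.inr ⟨y, by simp, by simp [hne], by simpa using hpre⟩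
      · exact Or.inr ⟨x, by simp [hx], hq, hqp⟩
    · rintro (h | ⟨x, hx, hq, hqp⟩)
      · exact Or.inl (Or.inl h)
      · rcases List.mem_cons.mp hx with rfl | hx'
        · exact Or.inl (Or.inr ⟨q, hq, hqp, by simp⟩)
        · exact Or.inr ⟨x, hx', hq, hqp⟩

theorem find_buildTrie (f : String → List Char) (ws : List String) (w : List Char) :
    trieFindGo (ws.foldl (fun S x => trieInsertGo S [] (f x)) PySem.Set.empty) [] w = true ↔
      w = [] ∨ ∃ x ∈ ws, w <+: f x := by
  rw [trieFindGo_iff]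
  constructor
  · intro h
    by_cases hw : w = []
    · exact Or.inl hw
    · have := h w hw List.prefix_rfl
      rw [mem_buildTrie] at this
      rcases this with h0 | ⟨x, hx, _, hp⟩
      · exact absurd h0 (by simp [PySem.Set.empty])
      · exact Or.inr ⟨x, hx, by simp at hp; exact hp⟩
  · rintro (rfl | ⟨x, hx, hp⟩) pre hne hpre
    · exact absurd (List.prefix_nil.mp hpre) hne
    · rw [mem_buildTrie]
      exact Or.inr ⟨x, hx, hne, by simpa using hpre.trans hp⟩

-- the per-word conditions of the two programs coincide
theorem cond_eq (s1 : List String) (w : String) :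
    (trieFindGo (s1.foldl (fun S x => trieInsertGo S [] x.toList) PySem.Set.empty) [] w.toList ||
     trieFindGo (s1.foldl (fun S x => trieInsertGo S [] x.toList.reverse) PySem.Set.empty) [] w.toList.reverse) =
    ((w == "") || s1.any (fun x => PySem.Str.startswith x w) || s1.any (fun x => PySem.Str.endswith x w)) := by
  rw [Bool.eq_iff_iff]
  simp only [Bool.or_eq_true, find_buildTrie, List.any_eq_true, PySem.Str.startswith_eq,
    PySem.Chars.startswith_iff, PySem.Str.endswith_eq, PySem.Chars.endswith_iff,
    List.reverse_eq_nil_iff, List.reverse_prefix, beq_iff_eq,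
    ← String.toList_inj, String.toList_empty]
  aesop

-- ===== VERDICT (by name: the statement is the Claim_ definition above) =====
theorem objs_split (s1 : List String) :
    s1.foldl (fun (o : PySem.Set (List Char) × PySem.Set (List Char)) item =>
        (trieInsertGo o.1 [] item.toList, trieInsertGo o.2 [] item.toList.reverse))
      (PySem.Set.empty, PySem.Set.empty)
    = (s1.foldl (fun S x => trieInsertGo S [] x.toList) PySem.Set.empty,
       s1.foldl (fun S x => trieInsertGo S [] x.toList.reverse) PySem.Set.empty) :=
  PySem.List.foldl_prod_mk (fun S x => trieInsertGo S [] x.toList)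
    (fun S x => trieInsertGo S [] x.toList.reverse) s1 PySem.Set.empty PySem.Set.empty

theorem prefixSuffixString_spec : Claim_equal_prefixSuffixString := by
  intro s1 s2 _
  show prefixSuffixString s1 s2 = prefixSuffixString_alt s1 s2
  simp only [prefixSuffixString, prefixSuffixString_alt, objs_split, cond_eq]
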